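-- pv_equiv track=rewrite | github.com/starrothkopf/backup-nineteenthcenturyfictioncorpus | query_fulltext_gutenberg.py | find_text_url
-- ===== SOURCE A (Python) =====
-- def find_text_url(book):
--     formats = book.get("formats", {})
--     preferred_order = [
--         "text/plain; charset=utf-8",
--         "text/plain; charset=us-ascii",
--         "text/plain; charset=iso-8859-1",
--         "text/plain"
--     ]
--     for encoding in preferred_order:
--         for mime, url in formats.items():
--             if mime.startswith(encoding):
--                 return url
--     for mime, url in formats.items():
--         if mime.startswith("text/plain"):
--             return url
--     return None
-- ===== SOURCE B (Python) =====
-- def find_text_url(book):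
--     formats = book.get("formats", {})
--     preferred_order = [
--         "text/plain; charset=utf-8",
--         "text/plain; charset=us-ascii",
--         "text/plain; charset=iso-8859-1",
--         "text/plain",
--     ]
--     best_rank = len(preferred_order)
--     best_url = None
--     for mime, url in formats.items():
--         rank = next((i for i, p in enumerate(preferred_order) if mime.startswith(p)),
--                     len(preferred_order))
--         if rank < best_rank:
--             best_rank, best_url = rank, url
--     return best_url
-- ===== Notes on version B (the rewrite author's own statement) =====
-- stated objective: alternative
-- what changed: Replaces A's up-to-five priority scans over the formats dict (one per preferred encoding plus a fallback pass) by a single pass that computes each entry's rank (smallest matching prefix index) and keeps the first entry with the minimal rank.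
import Mathlib
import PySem

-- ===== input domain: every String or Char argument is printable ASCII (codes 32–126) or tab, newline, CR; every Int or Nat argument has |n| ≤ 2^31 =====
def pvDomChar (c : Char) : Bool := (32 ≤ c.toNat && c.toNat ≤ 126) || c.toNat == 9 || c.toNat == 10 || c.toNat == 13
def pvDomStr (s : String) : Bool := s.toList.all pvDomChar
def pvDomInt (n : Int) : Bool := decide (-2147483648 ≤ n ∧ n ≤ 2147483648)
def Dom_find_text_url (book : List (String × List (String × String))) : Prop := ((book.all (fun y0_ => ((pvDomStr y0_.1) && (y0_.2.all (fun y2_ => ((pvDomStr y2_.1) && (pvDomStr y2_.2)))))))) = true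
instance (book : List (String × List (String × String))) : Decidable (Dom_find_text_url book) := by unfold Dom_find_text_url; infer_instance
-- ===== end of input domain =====

-- B makes one pass over the formats computing each entry's preference rank, instead of A's
-- up-to-five priority scans; alternative decomposition, same result.

-- ===== PORT A =====
-- the shared literal list of preferred encodings
def pvPrefs : List String :=
  ["text/plain; charset=utf-8", "text/plain; charset=us-ascii",
   "text/plain; charset=iso-8859-1", "text/plain"]

-- book.get("formats", {}) : first-match lookup in the association list
def pvFormats (book : List (String × List (String × String))) : List (String × String) :=
  ((book.find? (fun kv => kv.1 == "formats")).map (·.2)).getD []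

-- inner loop 'for mime, url in formats.items(): if mime.startswith(e): return url'
def pvScan (e : String) (fs : List (String × String)) : Option String :=
  (fs.find? (fun mu => PySem.Str.startswith mu.1 e)).map (·.2)

-- outer loop 'for encoding in preferred_order: …'
def pvOuter : List String → List (String × String) → Option String
  | [], _ => none
  | e :: es, fs =>
      match pvScan e fs with
      | some u => some u
      | none => pvOuter es fs

def find_text_url (book : List (String × List (String × String))) : Option String :=
  match pvOuter pvPrefs (pvFormats book) with
  | some u => some u
  | none =>
      match pvScan "text/plain" (pvFormats book) with
      | some u => some u
      | none => none

-- ===== PORT B =====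
-- rank = next((i for i, p in enumerate(preferred_order) if mime.startswith(p)), len(...))
def pvRank (mime : String) : Nat :=
  (pvPrefs.findIdx? (fun p => PySem.Str.startswith mime p)).getD pvPrefs.length

def find_text_url_alt (book : List (String × List (String × String))) : Option String :=
  ((pvFormats book).foldl
    (fun (st : Nat × Option String) mu =>
      let rank := pvRank mu.1
      if rank < st.1 then (rank, some mu.2) else st)
    (pvPrefs.length, none)).2

-- ===== PRECONDITION & SPEC =====
def Spec_find_text_url (book : List (String × List (String × String))) (out : Option String) : Prop := out = find_text_url_alt book
instance (book : List (String × List (String × String))) (out : Option String) : Decidable (Spec_find_text_url book out) := by unfold Spec_find_text_url; infer_instance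

-- ===== CLAIM (what is proved, stated in full; the proofs are below) =====
def Claim_equal_find_text_url : Prop := ∀ (book : List (String × List (String × String))), Dom_find_text_url book → Spec_find_text_url book (find_text_url book)

-- ===== LEMMAS AND PROOFS =====

-- ith preferred encoding ("" out of range; never reached there)
def pvEnc (i : Nat) : String := pvPrefs.getD i ""

-- B's fold written as the structural recursion it performs
def pvG (r : Nat) (b : Option String) : List (String × String) → Option String
  | [] => b
  | mu :: fs => if pvRank mu.1 < r then pvG (pvRank mu.1) (some mu.2) fs else pvG r b fs

-- A's first r priority passes (pass 0 first)
def pvK : Nat → List (String × String) → Option String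
  | 0, _ => none
  | r + 1, fs => (pvK r fs).or (pvScan (pvEnc r) fs)

theorem pvRank_eq (m : String) :
    pvRank m =
      if PySem.Str.startswith m (pvEnc 0) then 0
      else if PySem.Str.startswith m (pvEnc 1) then 1
      else if PySem.Str.startswith m (pvEnc 2) then 2
      else if PySem.Str.startswith m (pvEnc 3) then 3
      else 4 := by
  simp only [pvRank, pvPrefs, pvEnc, List.findIdx?]
  split_ifs with h0 h1 h2 h3 <;>
    simp_all [List.getD, List.findIdx?.go]

theorem pvRank_sw (m : String) (h : pvRank m < 4) :
    PySem.Str.startswith m (pvEnc (pvRank m)) = true := by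
  rw [pvRank_eq] at h ⊢
  split_ifs at h ⊢ <;> simp_all

theorem pvRank_not_sw (m : String) (i : Nat) (h : i < pvRank m) :
    PySem.Str.startswith m (pvEnc i) = false := by
  rw [pvRank_eq] at h
  split_ifs at h with h0 h1 h2 h3 <;> [skip; skip; skip; skip; skip] <;>
    first
    | omega
    | (interval_cases i <;> simp_all)

theorem pvScan_nil (e : String) : pvScan e [] = none := by simp [pvScan]

theorem pvK_nil (r : Nat) : pvK r [] = none := by
  induction r with
  | zero => rfl
  | succ r ih => simp [pvK, ih, pvScan_nil]

theorem pvScan_cons (e : String) (m u : String) (fs : List (String × String)) :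
    pvScan e ((m, u) :: fs) =
      if PySem.Str.startswith m e then some u else pvScan e fs := by
  simp [pvScan, List.find?]
  split_ifs with h <;> simp [h]

theorem pvK_cons (m u : String) (fs : List (String × String)) :
    ∀ r, r ≤ 4 →
      pvK r ((m, u) :: fs) =
        if pvRank m < r then (pvK (pvRank m) fs).or (some u) else pvK r fs := by
  intro r
  induction r with
  | zero => intro _; simp [pvK]
  | succ r ih =>
    intro hr
    have hr' : r ≤ 4 := by omega
    rcases lt_trichotomy (pvRank m) r with hlt | heq | hgt
    · -- already found at an earlier pass; pass r is irrelevant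
      rw [pvK, ih hr', if_pos hlt, if_pos (by omega), pvScan_cons]
      cases hK : pvK (pvRank m) fs <;> cases h : PySem.Str.startswith m (pvEnc r) <;>
        simp [Option.or]
    · -- this element matches exactly at pass r
      have hsw : PySem.Str.startswith m (pvEnc r) = true := by
        have := pvRank_sw m (by omega)
        rwa [heq] at this
      rw [pvK, ih hr', if_neg (by omega), if_pos (by omega), pvScan_cons, hsw, ← heq]
      simp
    · -- element not yet relevant at passes < r+1
      have hsw : PySem.Str.startswith m (pvEnc r) = false := pvRank_not_sw m r hgt
      rw [pvK, ih hr', if_neg (by omega), if_neg (by omega), pvScan_cons, hsw, pvK]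
      simp

theorem pvG_eq_pvK (fs : List (String × String)) :
    ∀ r b, r ≤ 4 → pvG r b fs = (pvK r fs).or b := by
  induction fs with
  | nil => intro r b _; simp [pvG, pvK_nil]
  | cons mu fs ih =>
    intro r b hr
    obtain ⟨m, u⟩ := mu
    rw [pvG, pvK_cons m u fs r hr]
    by_cases h : pvRank m < r
    · rw [if_pos h, if_pos h, ih (pvRank m) (some u) (by omega)]
      cases pvK (pvRank m) fs <;> simp [Option.or]
    · rw [if_neg h, if_neg h, ih r b hr]

theorem pvFold_eq_pvG (fs : List (String × String)) :
    ∀ r b,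
      (fs.foldl
        (fun (st : Nat × Option String) mu =>
          let rank := pvRank mu.1
          if rank < st.1 then (rank, some mu.2) else st) (r, b)).2 = pvG r b fs := by
  induction fs with
  | nil => intro r b; simp [pvG]
  | cons mu fs ih =>
    intro r b
    rw [List.foldl, pvG]
    by_cases h : pvRank mu.1 < r <;> simp only [h, ih, reduceIte]

theorem pvOuter_eq_pvK4 (fs : List (String × String)) :
    pvOuter pvPrefs fs = pvK 4 fs := by
  show pvOuter pvPrefs fs =
    (((((pvK 0 fs).or (pvScan (pvEnc 0) fs)).or (pvScan (pvEnc 1) fs)).or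
        (pvScan (pvEnc 2) fs)).or (pvScan (pvEnc 3) fs))
  simp only [pvK, pvPrefs, pvOuter, pvEnc, List.getD]
  rcases h0 : pvScan "text/plain; charset=utf-8" fs <;>
    rcases h1 : pvScan "text/plain; charset=us-ascii" fs <;>
      rcases h2 : pvScan "text/plain; charset=iso-8859-1" fs <;>
        rcases h3 : pvScan "text/plain" fs <;> simp [h0, h1, h2, h3, Option.or]

-- ===== VERDICT (by name: the statement is the Claim_ definition above) =====
theorem find_text_url_spec : Claim_equal_find_text_url := by
  intro book _
  unfold Spec_find_text_url find_text_url find_text_url_alt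
  rw [pvFold_eq_pvG, pvG_eq_pvK _ _ _ (by norm_num [pvPrefs]), Option.or_none,
    pvOuter_eq_pvK4]
  show _ = pvK 4 (pvFormats book)
  have h34 : pvK 4 (pvFormats book) =
      (pvK 3 (pvFormats book)).or (pvScan "text/plain" (pvFormats book)) := rfl
  cases h : pvK 4 (pvFormats book) with
  | some u => simp
  | none =>
    rw [h34] at h
    cases h3 : pvK 3 (pvFormats book) <;> rw [h3] at h <;> simp_all [Option.or]
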